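-- pv_equiv track=rewrite | github.com/Tuhin-SnapD/Striver23-DSA | 071_maximum_sum_combination.py | k_max_sum_combination
-- ===== SOURCE A (Python) =====
-- from typing import List, Set, Tuple
-- import heapq
--
-- def k_max_sum_combination(
--     a: List[int],
--     b: List[int],
--     n: int,
--     k: int
-- ) -> List[int]:
--     """
--     Find k maximum sum combinations using max heap.
--
--     Args:
--         a: First array
--         b: Second array
--         n: Length of arrays
--         k: Number of combinations needed
--
--     Returns:
--         List of k maximum sums
--     """
--     # Sort both arrays in descending order
--     a.sort(reverse=True)
--     b.sort(reverse=True)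
--
--     # Max heap: (-sum, (i, j))
--     heap = []
--     # Set to track visited pairs
--     visited: Set[Tuple[int, int]] = set()
--
--     # Push first combination
--     heapq.heappush(heap, (-(a[0] + b[0]), (0, 0)))
--     visited.add((0, 0))
--
--     result = []
--
--     for _ in range(k):
--         neg_sum, (i, j) = heapq.heappop(heap)
--         result.append(-neg_sum)
--
--         # Try next combinations
--         if i + 1 < n and (i + 1, j) not in visited:
--             heapq.heappush(heap, (-(a[i + 1] + b[j]), (i + 1, j)))
--             visited.add((i + 1, j))
--
--         if j + 1 < n and (i, j + 1) not in visited: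
--             heapq.heappush(heap, (-(a[i] + b[j + 1]), (i, j + 1)))
--             visited.add((i, j + 1))
--
--     return result
-- ===== SOURCE B (Python) =====
-- def k_max_sum_combination(a, b, n, k):
--     # Sort-everything rewrite: sorts a and b in place (like A), then takes the
--     # first k of all pairwise sums over the first n elements of each sorted
--     # array, sorted in descending order.
--     a.sort(reverse=True)
--     b.sort(reverse=True)
--     sums = sorted([x + y for x in a[:n] for y in b[:n]], reverse=True)
--     result = []
--     for t in range(k):
--         result.append(sums[t])
--     return result
-- ===== Notes on version B (the rewrite author's own statement) =====
-- stated objective: simpler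
-- what changed: Replaces the heap-frontier (Dijkstra-style) enumeration with visited-set bookkeeping by a direct 'compute all n*n pairwise sums of the first n sorted elements, sort descending, take the first k' formulation.
-- outside the precondition, e.g. on k_max_sum_combination([5, 7], [1, 2], 0, 1): A returns [9], B raises IndexError; on k_max_sum_combination([1, 2, 3], [1, 2, 3], 4, 2): A returns [6, 5], B returns [6, 5]
import Mathlib
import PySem

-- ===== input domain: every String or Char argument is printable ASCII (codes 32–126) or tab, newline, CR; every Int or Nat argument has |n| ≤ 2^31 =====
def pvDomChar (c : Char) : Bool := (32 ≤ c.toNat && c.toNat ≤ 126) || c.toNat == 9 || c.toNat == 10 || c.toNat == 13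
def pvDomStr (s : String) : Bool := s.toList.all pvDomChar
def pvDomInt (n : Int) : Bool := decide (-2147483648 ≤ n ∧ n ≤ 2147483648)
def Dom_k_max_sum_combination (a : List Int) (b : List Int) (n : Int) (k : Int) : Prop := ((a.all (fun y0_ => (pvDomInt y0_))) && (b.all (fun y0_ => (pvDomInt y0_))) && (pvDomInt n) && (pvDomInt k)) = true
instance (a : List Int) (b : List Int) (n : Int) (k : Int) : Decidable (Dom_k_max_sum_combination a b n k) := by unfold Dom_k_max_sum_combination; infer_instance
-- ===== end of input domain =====

-- B replaces A's heap-frontier enumeration by "sort all n*n pairwise sums of the first n sorted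
-- elements descending, take the first k"
-- (simpler).  Both A and B sort the argument lists in place (a caller-visible mutation); the equivalence
-- proved here is about the RETURN value.

-- ===== PORT A =====
-- Python tuple comparison (-sum, (i, j)) < (-sum', (i', j')), lexicographic.
def pvLexLt (x y : Int × Int × Int) : Bool :=
  decide (x.1 < y.1) ||
    (decide (x.1 = y.1) &&
      (decide (x.2.1 < y.2.1) || (decide (x.2.1 = y.2.1) && decide (x.2.2 < y.2.2))))

-- heapq.heappop: remove and return the smallest element (entries are distinct tuples, so the
-- minimum is unique); none = IndexError on an empty heap.
def pvHeapPop (h : List (Int × Int × Int)) : Option ((Int × Int × Int) × List (Int × Int × Int)) :=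
  match h with
  | [] => none
  | x :: xs =>
    let m := xs.foldl (fun m y => if pvLexLt y m then y else m) x
    some (m, (x :: xs).erase m)

-- the 'for _ in range(k)' loop of A; none = an uncaught IndexError (empty heap / index out of range)
def pvALoop (a b : List Int) (n : Int) :
    Nat → List (Int × Int × Int) → PySem.Set (Int × Int) → List Int → Option (List Int)
  | 0, _heap, _vis, res => some res
  | t + 1, heap, vis, res =>
    match pvHeapPop heap with
    | none => none
    | some (e, heap1) =>
      let i := e.2.1
      let j := e.2.2
      let res1 := res ++ [-e.1]
      match (if i + 1 < n ∧ (i + 1, j) ∉ vis then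
               match PySem.List.pyGet? a (i + 1), PySem.List.pyGet? b j with
               | some x, some y => some (heap1 ++ [(-(x + y), (i + 1, j))], PySem.Set.add vis (i + 1, j))
               | _, _ => none
             else some (heap1, vis)) with
      | none => none
      | some (heap2, vis2) =>
        match (if j + 1 < n ∧ (i, j + 1) ∉ vis2 then
                 match PySem.List.pyGet? a i, PySem.List.pyGet? b (j + 1) with
                 | some x, some y => some (heap2 ++ [(-(x + y), (i, j + 1))], PySem.Set.add vis2 (i, j + 1))
                 | _, _ => none
               else some (heap2, vis2)) with
        | none => none
        | some (heap3, vis3) => pvALoop a b n t heap3 vis3 res1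

def k_max_sum_combination (a : List Int) (b : List Int) (n : Int) (k : Int) : List Int :=
  let a := PySem.List.sorted a (fun x => x) true
  let b := PySem.List.sorted b (fun x => x) true
  match PySem.List.pyGet? a 0, PySem.List.pyGet? b 0 with
  | some a0, some b0 =>
      (pvALoop a b n k.toNat [(-(a0 + b0), (0, 0))]
        (PySem.Set.add PySem.Set.empty ((0 : Int), (0 : Int))) []).getD []
  | _, _ => []  -- IndexError a[0]/b[0] on an empty array (outside Pre_)

-- ===== PORT B =====
def k_max_sum_combination_alt (a : List Int) (b : List Int) (n : Int) (k : Int) : List Int :=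
  let a := PySem.List.sorted a (fun x => x) true
  let b := PySem.List.sorted b (fun x => x) true
  let sums := PySem.List.sorted
    ((PySem.List.slice a none (some n)).flatMap
      (fun x => (PySem.List.slice b none (some n)).map (fun y => x + y))) (fun s => s) true
  (((PySem.List.pyRange 0 k 1).mapM (fun t => PySem.List.pyGet? sums t)).getD [])
  -- mapM: the result-building loop; none = IndexError sums[t] (outside Pre_)

-- ===== PRECONDITION & SPEC =====
-- Pre_ excludes empty arrays and k > n*n (A raises IndexError there), and — beyond the always-safe
-- regions k ≤ 0 and k = 1 — the inputs where the declared length n exceeds an actual array length or is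
-- non-positive: on most of those A raises IndexError as soon as its heap frontier touches an
-- out-of-range index; the data-dependent fringe of such inputs on which A still happens to return
-- (an artefact of how far the frontier gets before hitting the bound, with no closed form — B in fact
-- agrees with A there whenever both return) cannot be admitted by a closed-form precondition.
def Pre_k_max_sum_combination (a : List Int) (b : List Int) (n : Int) (k : Int) : Prop :=
  a ≠ [] ∧ b ≠ [] ∧
    (k ≤ 0 ∨
      (1 ≤ n ∧ n ≤ (a.length : Int) ∧ n ≤ (b.length : Int) ∧ k ≤ n * n) ∨
      (k = 1 ∧ 1 ≤ n ∧ 2 ≤ (a.length : Int) ∧ 2 ≤ (b.length : Int)))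
instance (a : List Int) (b : List Int) (n : Int) (k : Int) : Decidable (Pre_k_max_sum_combination a b n k) := by unfold Pre_k_max_sum_combination; infer_instance

def pvWitness_k_max_sum_combination : List Int × List Int × Int × Int := ([3, 1], [2, 4], 2, 3)

def Spec_k_max_sum_combination (a : List Int) (b : List Int) (n : Int) (k : Int) (out : List Int) : Prop := out = k_max_sum_combination_alt a b n k
instance (a : List Int) (b : List Int) (n : Int) (k : Int) (out : List Int) : Decidable (Spec_k_max_sum_combination a b n k out) := by unfold Spec_k_max_sum_combination; infer_instance

-- ===== CLAIM (what is proved, stated in full; the proofs are below) =====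
def Claim_equal_k_max_sum_combination : Prop := ∀ (a : List Int) (b : List Int) (n : Int) (k : Int), Dom_k_max_sum_combination a b n k → Pre_k_max_sum_combination a b n k → Spec_k_max_sum_combination a b n k (k_max_sum_combination a b n k)

-- ===== LEMMAS AND PROOFS =====

-- the sum at grid position q, over the two sorted-descending arrays
def pvF (A' B' : List Int) (q : Int × Int) : Int :=
  PySem.List.pyGetD A' q.1 0 + PySem.List.pyGetD B' q.2 0

def pvGrid (n : Int) : List (Int × Int) :=
  (PySem.List.pyRange 0 n 1).flatMap (fun i => (PySem.List.pyRange 0 n 1).map (fun j => (i, j)))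

def pvVsort (l : List Int) : List Int := PySem.List.sorted l (fun x => x) true

-- sums of the grid positions not yet popped
def pvRemaining (A' B' : List Int) (n : Int) (P : List (Int × Int)) : List Int :=
  ((pvGrid n).filter (fun q => !decide (q ∈ P))).map (pvF A' B')

-- loop invariant: P = popped pairs (ghost), heap entries carry the correct sums over in-grid pairs,
-- pairs are globally distinct, vis = P ∪ heap pairs, popped keys precede all heap keys, and every
-- unpopped grid pair is dominated (componentwise) by some heap pair.
def pvInv (A' B' : List Int) (n : Int) (P : List (Int × Int))
    (heap : List (Int × Int × Int)) (vis : List (Int × Int)) : Prop :=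
  (∀ e ∈ heap, e.1 = -(pvF A' B' e.2) ∧ e.2 ∈ pvGrid n) ∧
  (heap.map Prod.snd).Nodup ∧
  P.Nodup ∧
  (∀ p ∈ P, p ∈ pvGrid n) ∧
  (∀ p ∈ P, p ∉ heap.map Prod.snd) ∧
  (∀ q : Int × Int, q ∈ vis ↔ q ∈ P ∨ q ∈ heap.map Prod.snd) ∧
  (∀ p ∈ P, ∀ e ∈ heap, pvLexLt (-(pvF A' B' p), p) e = true) ∧
  (∀ q ∈ pvGrid n, q ∉ P → ∃ e ∈ heap, e.2.1 ≤ q.1 ∧ e.2.2 ≤ q.2)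

-- basic facts about the tuple order
theorem pvLexLt_trans (x y z : Int × Int × Int) (h1 : pvLexLt x y = true) (h2 : pvLexLt y z = true) :
    pvLexLt x z = true := by
  obtain ⟨a1, a2, a3⟩ := x; obtain ⟨b1, b2, b3⟩ := y; obtain ⟨c1, c2, c3⟩ := z
  simp only [pvLexLt, Bool.or_eq_true, Bool.and_eq_true, decide_eq_true_eq] at h1 h2 ⊢
  omega

theorem pvLexLt_asymm (x y : Int × Int × Int) (h1 : pvLexLt x y = true) (h2 : pvLexLt y x = true) :
    False := by
  obtain ⟨a1, a2, a3⟩ := x; obtain ⟨b1, b2, b3⟩ := y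
  simp only [pvLexLt, Bool.or_eq_true, Bool.and_eq_true, decide_eq_true_eq] at h1 h2
  omega

theorem pvLexLt_total (x y : Int × Int × Int) (hne : x ≠ y) :
    pvLexLt x y = true ∨ pvLexLt y x = true := by
  obtain ⟨a1, a2, a3⟩ := x; obtain ⟨b1, b2, b3⟩ := y
  simp only [ne_eq, Prod.mk.injEq, not_and_or] at hne
  simp only [pvLexLt, Bool.or_eq_true, Bool.and_eq_true, decide_eq_true_eq]
  omega

theorem pvLexLt_irrefl (x : Int × Int × Int) : pvLexLt x x = false := by
  obtain ⟨a1, a2, a3⟩ := x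
  simp only [pvLexLt, Bool.or_eq_false_iff, Bool.and_eq_false_iff, decide_eq_false_iff_not]
  omega

theorem pvFoldlMin_spec (xs : List (Int × Int × Int)) : ∀ (x : Int × Int × Int),
    (xs.foldl (fun m y => if pvLexLt y m then y else m) x) ∈ x :: xs ∧
    ∀ e ∈ x :: xs, ¬ pvLexLt e (xs.foldl (fun m y => if pvLexLt y m then y else m) x) = true := by
  induction xs with
  | nil =>
    intro x
    refine ⟨by simp, ?_⟩
    intro e he
    simp only [List.mem_cons, List.not_mem_nil, or_false] at he
    subst he
    simp [pvLexLt_irrefl]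
  | cons y ys ih =>
    intro x
    simp only [List.foldl_cons]
    by_cases h : pvLexLt y x = true
    · simp only [h, if_pos]
      obtain ⟨hmem, hmin⟩ := ih y
      refine ⟨?_, ?_⟩
      · rcases List.mem_cons.mp hmem with h' | h' <;> simp [h']
      · intro e he hlt
        rcases List.mem_cons.mp he with he' | he'
        · subst he'
          exact (hmin y (by simp)) (pvLexLt_trans _ _ _ h hlt)
        · exact (hmin e he') hlt
    · simp only [h, if_neg, Bool.false_eq_true, not_false_iff]
      obtain ⟨hmem, hmin⟩ := ih x
      refine ⟨?_, ?_⟩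
      · rcases List.mem_cons.mp hmem with h' | h' <;> simp [h']
      · intro e he hlt
        rcases List.mem_cons.mp he with he' | he'
        · subst he'; exact (hmin e (by simp)) hlt
        rcases List.mem_cons.mp he' with he'' | he''
        · subst he''
          by_cases hxy : x = e
          · subst hxy; exact (hmin x (by simp)) hlt
          · rcases pvLexLt_total x e (by exact hxy) with hxe | hex
            · exact (hmin x (by simp)) (pvLexLt_trans _ _ _ hxe hlt)
            · exact h hex
        · exact (hmin e (List.mem_cons_of_mem _ he'')) hlt

theorem pvHeapPop_spec (heap : List (Int × Int × Int)) (hne : heap ≠ []) :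
    ∃ m, pvHeapPop heap = some (m, heap.erase m) ∧ m ∈ heap ∧
      ∀ e ∈ heap, ¬ pvLexLt e m = true := by
  cases heap with
  | nil => exact absurd rfl hne
  | cons x xs =>
    obtain ⟨hmem, hmin⟩ := pvFoldlMin_spec xs x
    exact ⟨_, rfl, hmem, hmin⟩

theorem pvGet_eq (xs : List Int) (i : Int) (h0 : 0 ≤ i) (h : i < (xs.length : Int)) :
    PySem.List.pyGet? xs i = some (PySem.List.pyGetD xs i 0) := by
  rw [PySem.List.pyGet?_eq_some_getElem xs h0 (by exact_mod_cast h),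
    PySem.List.pyGetD_of_nonneg xs 0 h0,
    List.getD_eq_getElem xs 0 (by omega)]

theorem mem_pvGrid (n : Int) (q : Int × Int) :
    q ∈ pvGrid n ↔ 0 ≤ q.1 ∧ q.1 < n ∧ 0 ≤ q.2 ∧ q.2 < n := by
  obtain ⟨i, j⟩ := q
  simp only [pvGrid, List.mem_flatMap, List.mem_map, PySem.List.mem_pyRange_one]
  constructor
  · rintro ⟨x, hx, y, hy, he⟩
    obtain ⟨rfl, rfl⟩ := Prod.mk.injEq .. ▸ he
    exact ⟨hx.1, hx.2, hy.1, hy.2⟩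
  · rintro ⟨h1, h2, h3, h4⟩
    exact ⟨i, ⟨h1, h2⟩, j, ⟨h3, h4⟩, rfl⟩

theorem pvGrid_nodup (n : Int) : (pvGrid n).Nodup := by
  have : pvGrid n = (PySem.List.pyRange 0 n 1).product (PySem.List.pyRange 0 n 1) := rfl
  rw [this]
  exact List.Nodup.product (PySem.List.nodup_pyRange_one 0 n) (PySem.List.nodup_pyRange_one 0 n)

theorem pvGrid_length (n : Int) : ((pvGrid n).length : Int) = n.toNat * n.toNat := by
  have : pvGrid n = (PySem.List.pyRange 0 n 1).product (PySem.List.pyRange 0 n 1) := rfl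
  rw [this]
  rw [show ((PySem.List.pyRange 0 n).product (PySem.List.pyRange 0 n)).length = (PySem.List.pyRange 0 n 1).length * (PySem.List.pyRange 0 n 1).length from List.length_product _ _]
  rw [PySem.List.length_pyRange_one]
  have : (n - 0).toNat = n.toNat := by omega
  rw [this]
  push_cast
  ring

theorem pvGetD_desc_mono (L : List Int) (hd : L.Pairwise (fun x y => y ≤ x))
    (i i' : Int) (h0 : 0 ≤ i) (hii' : i ≤ i') (h : i' < (L.length : Int)) :
    PySem.List.pyGetD L i' 0 ≤ PySem.List.pyGetD L i 0 := by
  rw [PySem.List.pyGetD_of_nonneg L 0 h0, PySem.List.pyGetD_of_nonneg L 0 (by omega)]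
  rw [List.getD_eq_getElem L 0 (show i.toNat < L.length by omega),
    List.getD_eq_getElem L 0 (show i'.toNat < L.length by omega)]
  rcases Nat.lt_or_ge i.toNat i'.toNat with hlt | hge
  · exact (List.pairwise_iff_getElem.mp hd) i.toNat i'.toNat (by omega) (by omega) hlt
  · have : i.toNat = i'.toNat := by omega
    simp [this]

theorem pvF_mono (A' B' : List Int) (n : Int)
    (hlenA : n ≤ (A'.length : Int)) (hlenB : n ≤ (B'.length : Int))
    (hdA : A'.Pairwise (fun x y => y ≤ x)) (hdB : B'.Pairwise (fun x y => y ≤ x))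
    (p q : Int × Int) (hp : p ∈ pvGrid n) (hq : q ∈ pvGrid n)
    (h1 : p.1 ≤ q.1) (h2 : p.2 ≤ q.2) : pvF A' B' q ≤ pvF A' B' p := by
  rw [mem_pvGrid] at hp hq
  unfold pvF
  have ha := pvGetD_desc_mono A' hdA p.1 q.1 hp.1 h1 (by omega)
  have hb := pvGetD_desc_mono B' hdB p.2 q.2 hp.2.2.1 h2 (by omega)
  omega

theorem pvKey_lt (A' B' : List Int) (n : Int)
    (hlenA : n ≤ (A'.length : Int)) (hlenB : n ≤ (B'.length : Int))
    (hdA : A'.Pairwise (fun x y => y ≤ x)) (hdB : B'.Pairwise (fun x y => y ≤ x))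
    (p q : Int × Int) (hp : p ∈ pvGrid n) (hq : q ∈ pvGrid n)
    (h1 : p.1 ≤ q.1) (h2 : p.2 ≤ q.2) (hne : p ≠ q) :
    pvLexLt (-(pvF A' B' p), p) (-(pvF A' B' q), q) = true := by
  have hf := pvF_mono A' B' n hlenA hlenB hdA hdB p q hp hq h1 h2
  have hne' : p.1 ≠ q.1 ∨ p.2 ≠ q.2 := by
    by_contra hc
    push_neg at hc
    exact hne (Prod.ext hc.1 hc.2)
  simp only [pvLexLt, Bool.or_eq_true, Bool.and_eq_true, decide_eq_true_eq]
  omega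

theorem pvVsort_congr_perm (l₁ l₂ : List Int) (hp : l₁.Perm l₂) : pvVsort l₁ = pvVsort l₂ := by
  refine List.eq_of_perm_of_sorted (le := fun a b => b ≤ a) (fun a b _ _ hab hba => le_antisymm hba hab)
    (PySem.List.sorted_pairwise_rev l₁ (fun x => x)) (PySem.List.sorted_pairwise_rev l₂ (fun x => x)) ?_
  exact ((PySem.List.sorted_perm l₁ _ true).trans hp).trans (PySem.List.sorted_perm l₂ _ true).symm

theorem pvVsort_max_cons (l : List Int) (x : Int) (hx : x ∈ l) (hmax : ∀ y ∈ l, y ≤ x) :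
    pvVsort l = x :: pvVsort (l.erase x) := by
  refine List.eq_of_perm_of_sorted (le := fun a b => b ≤ a) (fun a b _ _ hab hba => le_antisymm hba hab)
    (PySem.List.sorted_pairwise_rev l (fun x => x)) ?_ ?_
  · rw [List.pairwise_cons]
    refine ⟨fun y hy => ?_, PySem.List.sorted_pairwise_rev _ (fun x => x)⟩
    have : y ∈ l.erase x := (PySem.List.mem_sorted _ _ _ _).mp hy
    exact hmax y (List.mem_of_mem_erase this)
  · exact ((PySem.List.sorted_perm l _ true).trans (List.perm_cons_erase hx)).trans
      (List.Perm.cons x (PySem.List.sorted_perm (l.erase x) _ true).symm)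

theorem pvMapM_take (xs : List Int) (k : Int) (h : k.toNat ≤ xs.length) :
    ((PySem.List.pyRange 0 k 1).mapM (fun t => PySem.List.pyGet? xs t)).getD [] =
      xs.take k.toNat := by
  have hrange : PySem.List.pyRange 0 k 1 = (List.range k.toNat).map (fun t => ((t : Nat) : Int)) := by
    rw [PySem.List.pyRange_one]
    simp
  rw [hrange]
  have key : ∀ (m : Nat), m ≤ xs.length →
      ((List.range m).map (fun t => ((t : Nat) : Int))).mapM (fun t => PySem.List.pyGet? xs t) =
        some (xs.take m) := by
    intro m
    induction m with
    | zero => intro _; simp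
    | succ i ih =>
      intro hm
      rw [List.range_succ, List.map_append, List.mapM_append, ih (by omega)]
      rw [List.take_add_one]
      simp only [List.map_cons, List.map_nil, List.mapM_cons, List.mapM_nil,
        PySem.List.pyGet?_natCast, List.getElem?_eq_getElem (show i < xs.length by omega)]
      rfl
  rw [key k.toNat h]
  rfl

theorem pvGrid_map_f (A' B' : List Int) (n : Int)
    (hlenA : (A'.length : Int) = n) (hlenB : (B'.length : Int) = n) :
    (pvGrid n).map (pvF A' B') = A'.flatMap (fun x => B'.map (fun y => x + y)) := by
  unfold pvGrid pvF
  rw [List.map_flatMap]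
  have inner : ∀ i : Int, ((PySem.List.pyRange 0 n 1).map (fun j => (i, j))).map
        (fun q : Int × Int => PySem.List.pyGetD A' q.1 0 + PySem.List.pyGetD B' q.2 0) =
      B'.map (fun y => PySem.List.pyGetD A' i 0 + y) := by
    intro i
    rw [List.map_map]
    have : ((PySem.List.pyRange 0 n 1).map (fun j => PySem.List.pyGetD B' j 0)).map
        (fun y => PySem.List.pyGetD A' i 0 + y) = B'.map (fun y => PySem.List.pyGetD A' i 0 + y) := by
      rw [← hlenB, PySem.List.map_pyGetD_pyRange_zero']
    rw [← this, List.map_map]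
    rfl
  simp only [inner]
  have outer : (PySem.List.pyRange 0 n 1).flatMap
        (fun i => B'.map (fun y => PySem.List.pyGetD A' i 0 + y)) =
      (((PySem.List.pyRange 0 n 1).map (fun i => PySem.List.pyGetD A' i 0)).flatMap
        (fun x => B'.map (fun y => x + y))) := by
    rw [List.flatMap_def, List.flatMap_def, List.map_map]
    rfl
  rw [outer, ← hlenA, PySem.List.map_pyGetD_pyRange_zero']

theorem pvLexLt_fst_le (x y : Int × Int × Int) (h : pvLexLt x y = true) : x.1 ≤ y.1 := by
  obtain ⟨a1, a2, a3⟩ := x; obtain ⟨b1, b2, b3⟩ := y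
  simp only [pvLexLt, Bool.or_eq_true, Bool.and_eq_true, decide_eq_true_eq] at h
  omega

theorem pvExists_unpopped (n : Int) (hn : 0 ≤ n) (P : List (Int × Int))
    (hlt : (P.length : Int) < n * n) :
    ∃ q ∈ pvGrid n, q ∉ P := by
  by_contra hc
  push_neg at hc
  have hsub : pvGrid n ⊆ P := fun q hq => hc q hq
  have := ((pvGrid_nodup n).subperm hsub).length_le
  have hg := pvGrid_length n
  have hnn : ((n.toNat : Int)) = n := Int.toNat_of_nonneg hn
  have : (n : Int) * n ≤ (P.length : Int) := by
    rw [← hnn]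
    push_cast
    omega
  omega

theorem pvVsort_remaining_step (A' B' : List Int) (n : Int) (P : List (Int × Int))
    (m : Int × Int) (hmg : m ∈ pvGrid n) (hmP : m ∉ P)
    (hmax : ∀ q ∈ pvGrid n, q ∉ P → pvF A' B' q ≤ pvF A' B' m) :
    pvVsort (pvRemaining A' B' n P) =
      pvF A' B' m :: pvVsort (pvRemaining A' B' n (P ++ [m])) := by
  classical
  set f := pvF A' B' with hf
  set l := (pvGrid n).filter (fun q => !decide (q ∈ P)) with hl
  have hml : m ∈ l := by
    rw [hl, List.mem_filter]
    exact ⟨hmg, by simp [hmP]⟩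
  have hfm : f m ∈ l.map f := List.mem_map_of_mem hml
  have hmax' : ∀ y ∈ l.map f, y ≤ f m := by
    intro y hy
    obtain ⟨q, hq, rfl⟩ := List.mem_map.mp hy
    rw [hl, List.mem_filter] at hq
    exact hmax q hq.1 (by simpa using hq.2)
  have h1 : pvVsort (pvRemaining A' B' n P) = f m :: pvVsort ((l.map f).erase (f m)) :=
    pvVsort_max_cons (l.map f) (f m) hfm hmax'
  rw [h1]
  congr 1
  apply pvVsort_congr_perm
  -- (l.map f).erase (f m) ~ pvRemaining (P ++ [m])
  have hlnd : l.Nodup := (pvGrid_nodup n).filter _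
  have hl2 : pvRemaining A' B' n (P ++ [m]) = (l.erase m).map f := by
    unfold pvRemaining
    congr 1
    rw [List.Nodup.erase_eq_filter hlnd m, hl, List.filter_filter]
    apply List.filter_congr
    intro q _
    simp only [List.mem_append, List.mem_singleton]
    by_cases h1 : q ∈ P <;> by_cases h2 : q = m <;> simp [h1, h2]
  rw [hl2]
  have p1 : l.Perm (m :: l.erase m) := List.perm_cons_erase hml
  have p2 : (l.map f).Perm (f m :: (l.erase m).map f) := by simpa using p1.map f
  have p3 : (l.map f).Perm (f m :: (l.map f).erase (f m)) := List.perm_cons_erase hfm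
  exact (p3.symm.trans p2).cons_inv

theorem pvInv_step (A' B' : List Int) (n : Int)
    (hlenA : n ≤ (A'.length : Int)) (hlenB : n ≤ (B'.length : Int))
    (hdA : A'.Pairwise (fun x y => y ≤ x)) (hdB : B'.Pairwise (fun x y => y ≤ x))
    (P : List (Int × Int)) (heap : List (Int × Int × Int)) (vis : List (Int × Int))
    (hInv : pvInv A' B' n P heap vis)
    (m : Int × Int × Int) (hm_mem : m ∈ heap) (hm_min : ∀ e ∈ heap, ¬ pvLexLt e m = true)
    (new : List (Int × Int))
    (hnew : ∀ c ∈ new, c ∈ pvGrid n ∧ m.2.1 ≤ c.1 ∧ m.2.2 ≤ c.2 ∧ c ≠ m.2 ∧ c ∉ vis)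
    (hnewnd : new.Nodup)
    (hcover1 : ∀ q : Int × Int, q ∈ pvGrid n → m.2.1 < q.1 → m.2.2 ≤ q.2 →
      ((m.2.1 + 1, m.2.2) ∈ new ∨ (m.2.1 + 1, m.2.2) ∈ vis))
    (hcover2 : ∀ q : Int × Int, q ∈ pvGrid n → m.2.1 ≤ q.1 → m.2.2 < q.2 →
      ((m.2.1, m.2.2 + 1) ∈ new ∨ (m.2.1, m.2.2 + 1) ∈ vis)) :
    pvInv A' B' n (P ++ [m.2])
      (heap.erase m ++ new.map (fun c => (-(pvF A' B' c), c)))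
      (vis ++ new) := by
  classical
  obtain ⟨h1, h2, h3, h4, h5, h6, h7, h8⟩ := hInv
  obtain ⟨hm1, hm2g⟩ := h1 m hm_mem
  have hm_eq : m = (-(pvF A' B' m.2), m.2) := Prod.ext hm1 rfl
  have hheapnd : heap.Nodup := List.Nodup.of_map Prod.snd h2
  have hE_mem : ∀ e, e ∈ heap.erase m ↔ e ≠ m ∧ e ∈ heap := fun e =>
    List.Nodup.mem_erase_iff hheapnd
  have hsnd_inj : ∀ e ∈ heap, ∀ e' ∈ heap, e.2 = e'.2 → e = e' := by
    intro e he e' he' hee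
    exact List.inj_on_of_nodup_map h2 he he' hee
  have hme_key : ∀ e ∈ heap, e ≠ m → pvLexLt m e = true := by
    intro e he hne
    rcases pvLexLt_total m e (fun h => hne h.symm) with h | h
    · exact h
    · exact absurd h (hm_min e he)
  have hkey_m_new : ∀ c ∈ new, pvLexLt m (-(pvF A' B' c), c) = true := by
    intro c hc
    obtain ⟨hcg, hc1, hc2, hcne, _⟩ := hnew c hc
    rw [hm_eq]
    exact pvKey_lt A' B' n hlenA hlenB hdA hdB m.2 c hm2g hcg hc1 hc2 (fun h => hcne h.symm)
  have hEpair : ∀ q : Int × Int, q ∈ (heap.erase m).map Prod.snd ↔ (q ≠ m.2 ∧ q ∈ heap.map Prod.snd) := by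
    intro q
    constructor
    · rintro hq
      obtain ⟨e, he, rfl⟩ := List.mem_map.mp hq
      obtain ⟨hne, he'⟩ := (hE_mem e).mp he
      refine ⟨?_, List.mem_map_of_mem he'⟩
      intro hq2
      exact hne (hsnd_inj e he' m hm_mem hq2)
    · rintro ⟨hne, hq⟩
      obtain ⟨e, he, rfl⟩ := List.mem_map.mp hq
      exact List.mem_map_of_mem ((hE_mem e).mpr ⟨fun h => hne (by rw [h]), he⟩)
  have hheap_vis : ∀ q : Int × Int, q ∈ heap.map Prod.snd → q ∈ vis := by
    intro q hq
    exact (h6 q).mpr (Or.inr hq)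
  have hNpair : (new.map (fun c => (-(pvF A' B' c), c))).map Prod.snd = new := by
    rw [List.map_map]; exact List.map_id new
  refine ⟨?_, ?_, ?_, ?_, ?_, ?_, ?_, ?_⟩
  · -- entries
    intro e he
    rcases List.mem_append.mp he with he | he
    · exact h1 e ((hE_mem e).mp he).2
    · obtain ⟨c, hc, rfl⟩ := List.mem_map.mp he
      exact ⟨rfl, (hnew c hc).1⟩
  · -- pairs nodup
    rw [List.map_append, hNpair, List.nodup_append]
    refine ⟨List.Nodup.sublist (List.Sublist.map Prod.snd (List.erase_sublist)) h2, hnewnd, ?_⟩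
    intro q hq q' hq' heq
    subst heq
    exact (hnew q hq').2.2.2.2 (hheap_vis q ((hEpair q).mp hq).2)
  · -- P' nodup
    rw [List.nodup_append]
    refine ⟨h3, List.nodup_singleton _, ?_⟩
    intro p hp p' hp' heq
    rw [List.mem_singleton] at hp'
    subst heq
    rw [hp'] at hp
    exact h5 _ hp (List.mem_map_of_mem hm_mem)
  · -- P' ⊆ grid
    intro p hp
    rcases List.mem_append.mp hp with hp | hp
    · exact h4 p hp
    · rw [List.mem_singleton] at hp; subst hp; exact hm2g
  · -- disjoint
    intro p hp
    rw [List.map_append, hNpair, List.mem_append]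
    push_neg
    rcases List.mem_append.mp hp with hp | hp
    · refine ⟨fun hc => ?_, fun hc => ?_⟩
      · exact h5 p hp ((hEpair p).mp hc).2
      · exact (hnew p hc).2.2.2.2 ((h6 p).mpr (Or.inl hp))
    · rw [List.mem_singleton] at hp; subst hp
      refine ⟨fun hc => ?_, fun hc => (hnew _ hc).2.2.2.1 rfl⟩
      exact ((hEpair _).mp hc).1 rfl
  · -- vis iff
    intro q
    rw [List.mem_append, List.map_append, hNpair, List.mem_append, List.mem_append,
      List.mem_singleton]
    constructor
    · rintro (hq | hq)
      · rcases (h6 q).mp hq with hq' | hq'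
        · exact Or.inl (Or.inl hq')
        · by_cases hqm : q = m.2
          · exact Or.inl (Or.inr hqm)
          · exact Or.inr (Or.inl ((hEpair q).mpr ⟨hqm, hq'⟩))
      · exact Or.inr (Or.inr hq)
    · rintro ((hq | hq) | (hq | hq))
      · exact Or.inl ((h6 q).mpr (Or.inl hq))
      · exact Or.inl ((h6 q).mpr (Or.inr (by rw [hq]; exact List.mem_map_of_mem hm_mem)))
      · exact Or.inl (hheap_vis q ((hEpair q).mp hq).2)
      · exact Or.inr hq
  · -- keys
    intro p hp e he
    rcases List.mem_append.mp hp with hp | hp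
    · rcases List.mem_append.mp he with he | he
      · exact h7 p hp e ((hE_mem e).mp he).2
      · obtain ⟨c, hc, rfl⟩ := List.mem_map.mp he
        exact pvLexLt_trans _ _ _ (h7 p hp m hm_mem) (hkey_m_new c hc)
    · rw [List.mem_singleton] at hp; subst hp
      rw [← hm_eq]
      rcases List.mem_append.mp he with he | he
      · obtain ⟨hne, he'⟩ := (hE_mem e).mp he
        exact hme_key e he' hne
      · obtain ⟨c, hc, rfl⟩ := List.mem_map.mp he
        exact hkey_m_new c hc
  · -- dominance
    intro q hqg hqP
    rw [List.mem_append, List.mem_singleton] at hqP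
    push_neg at hqP
    obtain ⟨hqP, hqm⟩ := hqP
    obtain ⟨e, he, hd1, hd2⟩ := h8 q hqg hqP
    by_cases hem : e = m
    · subst hem
      have hqgb := (mem_pvGrid n q).mp hqg
      have hmgb := (mem_pvGrid n e.2).mp hm2g
      obtain ⟨hqb1, hqb2, hqb3, hqb4⟩ := hqgb
      obtain ⟨hmb1, hmb2, hmb3, hmb4⟩ := hmgb
      -- q strictly dominates m.2 in at least one coordinate
      have hq1 : e.2.1 < q.1 ∨ (e.2.1 = q.1 ∧ e.2.2 < q.2) := by
        rcases lt_or_eq_of_le hd1 with h | h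
        · exact Or.inl h
        · rcases lt_or_eq_of_le hd2 with h' | h'
          · exact Or.inr ⟨h, h'⟩
          · exact absurd (Prod.ext h.symm h'.symm) hqm
      -- helper for using a visited child as dominator
      have huse : ∀ c : Int × Int, c ∈ pvGrid n → e.2.1 ≤ c.1 → e.2.2 ≤ c.2 → c ≠ e.2 →
          c.1 ≤ q.1 → c.2 ≤ q.2 → (c ∈ new ∨ c ∈ vis) →
          ∃ e' ∈ heap.erase e ++ new.map (fun c => (-(pvF A' B' c), c)),
            e'.2.1 ≤ q.1 ∧ e'.2.2 ≤ q.2 := by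
        intro c hcg hc1 hc2 hcne hcq1 hcq2 hc
        rcases hc with hc | hc
        · exact ⟨(-(pvF A' B' c), c), List.mem_append.mpr (Or.inr (List.mem_map_of_mem hc)),
            hcq1, hcq2⟩
        · rcases (h6 c).mp hc with hcP | hcH
          · -- c ∈ P: contradiction with key order
            exfalso
            have hk1 : pvLexLt (-(pvF A' B' c), c) e = true := h7 c hcP e he
            have hk2 : pvLexLt e (-(pvF A' B' c), c) = true := by
              rw [hm_eq]
              exact pvKey_lt A' B' n hlenA hlenB hdA hdB e.2 c hm2g hcg hc1 hc2
                (fun h => hcne h.symm)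
            exact pvLexLt_asymm _ _ hk1 hk2
          · obtain ⟨e', he', rfl⟩ := List.mem_map.mp hcH
            have hne' : e' ≠ e := by
              intro h; subst h; exact hcne rfl
            exact ⟨e', List.mem_append.mpr (Or.inl ((hE_mem e').mpr ⟨hne', he'⟩)), hcq1, hcq2⟩
      rcases hq1 with h | ⟨h, h'⟩
      · refine huse (e.2.1 + 1, e.2.2) ?_ (by omega) (by omega) ?_ (by omega) (by omega) ?_
        · rw [mem_pvGrid]; constructor <;> [omega; constructor <;> [omega; omega]]
        · intro hc
          have h2' : e.2.1 + 1 = e.2.1 := congrArg Prod.fst hc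
          omega
        · exact hcover1 q (by rw [mem_pvGrid]; omega) h hd2
      · refine huse (e.2.1, e.2.2 + 1) ?_ (by omega) (by omega) ?_ (by omega) (by omega) ?_
        · rw [mem_pvGrid]; constructor <;> [omega; constructor <;> [omega; omega]]
        · intro hc
          have h2' : e.2.2 + 1 = e.2.2 := congrArg Prod.snd hc
          omega
        · exact hcover2 q (by rw [mem_pvGrid]; omega) hd1 h'
    · exact ⟨e, List.mem_append.mpr (Or.inl ((hE_mem e).mpr ⟨hem, he⟩)), hd1, hd2⟩

theorem pvALoop_spec (A' B' : List Int) (n : Int) (hn : 0 ≤ n)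
    (hlenA : n ≤ (A'.length : Int)) (hlenB : n ≤ (B'.length : Int))
    (hdA : A'.Pairwise (fun x y => y ≤ x)) (hdB : B'.Pairwise (fun x y => y ≤ x)) :
    ∀ (t : Nat) (P : List (Int × Int)) (heap : List (Int × Int × Int))
      (vis : PySem.Set (Int × Int)) (res : List Int),
      pvInv A' B' n P heap vis → (t : Int) + P.length ≤ n * n →
      pvALoop A' B' n t heap vis res = some (res ++ (pvVsort (pvRemaining A' B' n P)).take t) := by
  intro t
  induction t with
  | zero =>
    intro P heap vis res hInv hbound
    simp [pvALoop]
  | succ t ih =>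
    intro P heap vis res hInv hbound
    obtain ⟨h1, h2, h3, h4, h5, h6, h7, h8⟩ := hInv
    have hne : heap ≠ [] := by
      obtain ⟨q, hqg, hqP⟩ := pvExists_unpopped n hn P (by push_cast at hbound; omega)
      obtain ⟨e, he, _⟩ := h8 q hqg hqP
      intro hnil
      rw [hnil] at he
      exact List.not_mem_nil.elim he
    obtain ⟨m, hpop, hm_mem, hm_min⟩ := pvHeapPop_spec heap hne
    obtain ⟨hm1, hm2g⟩ := h1 m hm_mem
    have hm2P : m.2 ∉ P := fun hP => h5 m.2 hP (List.mem_map_of_mem hm_mem)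
    obtain ⟨hmb1, hmb2, hmb3, hmb4⟩ := (mem_pvGrid n m.2).mp hm2g
    have hmax : ∀ q ∈ pvGrid n, q ∉ P → pvF A' B' q ≤ pvF A' B' m.2 := by
      intro q hqg hqP
      obtain ⟨e, he, hd1, hd2⟩ := h8 q hqg hqP
      obtain ⟨he1, he2g⟩ := h1 e he
      have hef : pvF A' B' q ≤ pvF A' B' e.2 :=
        pvF_mono A' B' n hlenA hlenB hdA hdB e.2 q he2g hqg hd1 hd2
      by_cases hem : e = m
      · subst hem; exact hef
      · have hlt : pvLexLt m e = true := by
          rcases pvLexLt_total m e (fun h => hem h.symm) with h | h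
          · exact h
          · exact absurd h (hm_min e he)
        have hfst := pvLexLt_fst_le m e hlt
        rw [hm1, he1] at hfst
        omega
    rw [pvVsort_remaining_step A' B' n P m.2 hm2g hm2P hmax, List.take_succ_cons]
    have hInv0 : pvInv A' B' n P heap vis := ⟨h1, h2, h3, h4, h5, h6, h7, h8⟩
    have hbound' : (t : Int) + ((P ++ [m.2]).length : Int) ≤ n * n := by
      have hlen1 : ((P ++ [m.2]).length : Int) = (P.length : Int) + 1 := by
        rw [List.length_append]; push_cast; simp
      rw [hlen1]
      push_cast at hbound
      omega
    have hresfin : res ++ [-m.1] ++ (pvVsort (pvRemaining A' B' n (P ++ [m.2]))).take t =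
        res ++ (pvF A' B' m.2 :: (pvVsort (pvRemaining A' B' n (P ++ [m.2]))).take t) := by
      rw [hm1, neg_neg, List.append_assoc, List.singleton_append]
    simp only [pvALoop, hpop]
    by_cases hc1 : m.2.1 + 1 < n ∧ ((m.2.1 + 1, m.2.2) : Int × Int) ∉ vis
    · -- first child pushed
      have hga : PySem.List.pyGet? A' (m.2.1 + 1) = some (PySem.List.pyGetD A' (m.2.1 + 1) 0) :=
        pvGet_eq A' _ (by omega) (by omega)
      have hgb : PySem.List.pyGet? B' m.2.2 = some (PySem.List.pyGetD B' m.2.2 0) :=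
        pvGet_eq B' _ (by omega) (by omega)
      have hadd1 : PySem.Set.add vis ((m.2.1 + 1, m.2.2) : Int × Int) = vis ++ [(m.2.1 + 1, m.2.2)] :=
        PySem.Set.add_of_not_mem hc1.2
      rw [if_pos hc1, hga, hgb, hadd1]
      simp only []
      by_cases hc2 : m.2.2 + 1 < n ∧ ((m.2.1, m.2.2 + 1) : Int × Int) ∉ vis ++ [(m.2.1 + 1, m.2.2)]
      · have hga2 : PySem.List.pyGet? A' m.2.1 = some (PySem.List.pyGetD A' m.2.1 0) :=
          pvGet_eq A' _ (by omega) (by omega)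
        have hgb2 : PySem.List.pyGet? B' (m.2.2 + 1) = some (PySem.List.pyGetD B' (m.2.2 + 1) 0) :=
          pvGet_eq B' _ (by omega) (by omega)
        have hc2vis : ((m.2.1, m.2.2 + 1) : Int × Int) ∉ vis := by
          intro h
          exact hc2.2 (List.mem_append.mpr (Or.inl h))
        have hadd2 : PySem.Set.add (vis ++ [((m.2.1 + 1, m.2.2) : Int × Int)]) (m.2.1, m.2.2 + 1) =
            vis ++ [(m.2.1 + 1, m.2.2)] ++ [(m.2.1, m.2.2 + 1)] :=
          PySem.Set.add_of_not_mem hc2.2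
        rw [if_pos hc2, hga2, hgb2, hadd2]
        have hstep := pvInv_step A' B' n hlenA hlenB hdA hdB P heap vis hInv0 m hm_mem hm_min
          [(m.2.1 + 1, m.2.2), (m.2.1, m.2.2 + 1)]
          (by
            intro c hc
            rcases List.mem_cons.mp hc with rfl | hc
            · refine ⟨(mem_pvGrid n _).mpr (by constructor <;> [omega; exact ⟨hc1.1, by omega, hmb4⟩]), by omega, le_refl _, ?_, hc1.2⟩
              intro h
              have : m.2.1 + 1 = m.2.1 := congrArg Prod.fst h
              omega
            rcases List.mem_cons.mp hc with rfl | hc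
            · refine ⟨(mem_pvGrid n _).mpr (by constructor <;> [omega; exact ⟨by omega, by omega, hc2.1⟩]), le_refl _, by omega, ?_, hc2vis⟩
              intro h
              have : m.2.2 + 1 = m.2.2 := congrArg Prod.snd h
              omega
            · exact absurd hc List.not_mem_nil)
          (by
            refine List.nodup_cons.mpr ⟨?_, List.nodup_singleton _⟩
            intro h
            rw [List.mem_singleton] at h
            have : m.2.1 + 1 = m.2.1 := congrArg Prod.fst h
            omega)
          (fun q _ _ _ => Or.inl (by simp))
          (fun q _ _ _ => Or.inl (by simp))
        refine Eq.trans (ih (P ++ [m.2]) _ _ (res ++ [-m.1]) ?_ hbound') (by rw [hresfin])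
        have hlist : (heap.erase m ++ [(-(PySem.List.pyGetD A' (m.2.1 + 1) 0 + PySem.List.pyGetD B' m.2.2 0), (m.2.1 + 1, m.2.2))]) ++
              [(-(PySem.List.pyGetD A' m.2.1 0 + PySem.List.pyGetD B' (m.2.2 + 1) 0), (m.2.1, m.2.2 + 1))] =
            heap.erase m ++
              ([((m.2.1 + 1, m.2.2) : Int × Int), (m.2.1, m.2.2 + 1)].map (fun c => (-(pvF A' B' c), c))) := by
          rw [List.append_assoc]
          rfl
        rw [hlist, List.append_assoc vis]
        exact hstep
      · rw [if_neg hc2]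
        have hstep := pvInv_step A' B' n hlenA hlenB hdA hdB P heap vis hInv0 m hm_mem hm_min
          [(m.2.1 + 1, m.2.2)]
          (by
            intro c hc
            rcases List.mem_cons.mp hc with rfl | hc
            · refine ⟨(mem_pvGrid n _).mpr (by constructor <;> [omega; exact ⟨hc1.1, by omega, hmb4⟩]), by omega, le_refl _, ?_, hc1.2⟩
              intro h
              have : m.2.1 + 1 = m.2.1 := congrArg Prod.fst h
              omega
            · exact absurd hc List.not_mem_nil)
          (List.nodup_singleton _)
          (fun q _ _ _ => Or.inl (by simp))
          (by
            intro q hq hq1 hq2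
            right
            -- guard failed: m.2.2 + 1 < n holds, so the child is visited
            have hn2 : m.2.2 + 1 < n := by
              have := ((mem_pvGrid n q).mp hq).2.2.2
              omega
            by_contra hcv
            exact hc2 ⟨hn2, by
              intro hmem
              rcases List.mem_append.mp hmem with h | h
              · exact hcv h
              · rw [List.mem_singleton] at h
                have h1' : m.2.1 = m.2.1 + 1 := congrArg Prod.fst h
                omega⟩)
        refine Eq.trans (ih (P ++ [m.2]) _ _ (res ++ [-m.1]) ?_ hbound') (by rw [hresfin])
        have hlist : heap.erase m ++ [(-(PySem.List.pyGetD A' (m.2.1 + 1) 0 + PySem.List.pyGetD B' m.2.2 0), (m.2.1 + 1, m.2.2))] =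
            heap.erase m ++ ([((m.2.1 + 1, m.2.2) : Int × Int)].map (fun c => (-(pvF A' B' c), c))) := rfl
        rw [hlist]
        exact hstep
    · rw [if_neg hc1]
      simp only []
      by_cases hc2 : m.2.2 + 1 < n ∧ ((m.2.1, m.2.2 + 1) : Int × Int) ∉ vis
      · have hga2 : PySem.List.pyGet? A' m.2.1 = some (PySem.List.pyGetD A' m.2.1 0) :=
          pvGet_eq A' _ (by omega) (by omega)
        have hgb2 : PySem.List.pyGet? B' (m.2.2 + 1) = some (PySem.List.pyGetD B' (m.2.2 + 1) 0) :=
          pvGet_eq B' _ (by omega) (by omega)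
        have hadd2 : PySem.Set.add vis ((m.2.1, m.2.2 + 1) : Int × Int) = vis ++ [(m.2.1, m.2.2 + 1)] :=
          PySem.Set.add_of_not_mem hc2.2
        rw [if_pos hc2, hga2, hgb2, hadd2]
        have hstep := pvInv_step A' B' n hlenA hlenB hdA hdB P heap vis hInv0 m hm_mem hm_min
          [(m.2.1, m.2.2 + 1)]
          (by
            intro c hc
            rcases List.mem_cons.mp hc with rfl | hc
            · refine ⟨(mem_pvGrid n _).mpr (by constructor <;> [omega; exact ⟨by omega, by omega, hc2.1⟩]), le_refl _, by omega, ?_, hc2.2⟩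
              intro h
              have : m.2.2 + 1 = m.2.2 := congrArg Prod.snd h
              omega
            · exact absurd hc List.not_mem_nil)
          (List.nodup_singleton _)
          (by
            intro q hq hq1 hq2
            right
            have hn1 : m.2.1 + 1 < n := by
              have := ((mem_pvGrid n q).mp hq).2.1
              omega
            by_contra hcv
            exact hc1 ⟨hn1, hcv⟩)
          (fun q _ _ _ => Or.inl (by simp))
        refine Eq.trans (ih (P ++ [m.2]) _ _ (res ++ [-m.1]) ?_ hbound') (by rw [hresfin])
        have hlist : heap.erase m ++ [(-(PySem.List.pyGetD A' m.2.1 0 + PySem.List.pyGetD B' (m.2.2 + 1) 0), (m.2.1, m.2.2 + 1))] =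
            heap.erase m ++ ([((m.2.1, m.2.2 + 1) : Int × Int)].map (fun c => (-(pvF A' B' c), c))) := rfl
        rw [hlist]
        exact hstep
      · rw [if_neg hc2]
        have hstep := pvInv_step A' B' n hlenA hlenB hdA hdB P heap vis hInv0 m hm_mem hm_min []
          (fun c hc => absurd hc List.not_mem_nil)
          List.nodup_nil
          (by
            intro q hq hq1 hq2
            right
            have hn1 : m.2.1 + 1 < n := by
              have := ((mem_pvGrid n q).mp hq).2.1
              omega
            by_contra hcv
            exact hc1 ⟨hn1, hcv⟩)
          (by
            intro q hq hq1 hq2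
            right
            have hn2 : m.2.2 + 1 < n := by
              have := ((mem_pvGrid n q).mp hq).2.2.2
              omega
            by_contra hcv
            exact hc2 ⟨hn2, hcv⟩)
        refine Eq.trans (ih (P ++ [m.2]) _ _ (res ++ [-m.1]) ?_ hbound') (by rw [hresfin])
        simpa using hstep

-- ===== VERDICT (by name: the statement is the Claim_ definition above) =====
theorem pvGetD_take (L : List Int) (m : Nat) (i : Int) (h0 : 0 ≤ i) (hi : i.toNat < m)
    (hlen : i.toNat < L.length) :
    PySem.List.pyGetD (L.take m) i 0 = PySem.List.pyGetD L i 0 := by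
  rw [PySem.List.pyGetD_of_nonneg _ 0 h0, PySem.List.pyGetD_of_nonneg _ 0 h0]
  have hb : i.toNat < (L.take m).length := by
    rw [List.length_take]
    omega
  rw [List.getD_eq_getElem _ 0 hb, List.getD_eq_getElem _ 0 hlen]
  exact List.getElem_take

theorem k_max_sum_combination_spec : Claim_equal_k_max_sum_combination := by
  unfold Claim_equal_k_max_sum_combination
  intro a b n k _hDom hPre
  obtain ⟨hane, hbne, hcase⟩ := hPre
  unfold Spec_k_max_sum_combination k_max_sum_combination k_max_sum_combination_alt
  simp only []
  set A' := PySem.List.sorted a (fun x => x) true with hA'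
  set B' := PySem.List.sorted b (fun x => x) true with hB'
  have hAlen : 0 < A'.length := by
    rw [hA', PySem.List.length_sorted]; exact List.length_pos_of_ne_nil hane
  have hBlen : 0 < B'.length := by
    rw [hB', PySem.List.length_sorted]; exact List.length_pos_of_ne_nil hbne
  have hdA : A'.Pairwise (fun x y => y ≤ x) := PySem.List.sorted_pairwise_rev a (fun x => x)
  have hdB : B'.Pairwise (fun x y => y ≤ x) := PySem.List.sorted_pairwise_rev b (fun x => x)
  have hga : PySem.List.pyGet? A' 0 = some (PySem.List.pyGetD A' 0 0) :=
    pvGet_eq A' 0 (le_refl 0) (by exact_mod_cast hAlen)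
  have hgb : PySem.List.pyGet? B' 0 = some (PySem.List.pyGetD B' 0 0) :=
    pvGet_eq B' 0 (le_refl 0) (by exact_mod_cast hBlen)
  rw [hga, hgb]
  simp only []
  by_cases hk0 : k ≤ 0
  · -- range(k) is empty and the loop body never runs
    have hkt : k.toNat = 0 := by omega
    rw [hkt, PySem.List.pyRange_one_eq_nil hk0]
    simp [pvALoop]
  rcases hcase.resolve_left hk0 with hmain | hb3
  · obtain ⟨hn1, hna, hnb, hk⟩ := hmain
    have hlenA : n ≤ (A'.length : Int) := by rw [hA', PySem.List.length_sorted]; exact hna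
    have hlenB : n ≤ (B'.length : Int) := by rw [hB', PySem.List.length_sorted]; exact hnb
    have h00g : ((0 : Int), (0 : Int)) ∈ pvGrid n :=
      (mem_pvGrid n _).mpr (by constructor <;> [omega; exact ⟨by omega, by omega, by omega⟩])
    have hInv0 : pvInv A' B' n []
        [(-(PySem.List.pyGetD A' 0 0 + PySem.List.pyGetD B' 0 0), ((0 : Int), (0 : Int)))]
        [((0 : Int), (0 : Int))] := by
      refine ⟨?_, by simp, List.nodup_nil, by simp, by simp, ?_, by simp, ?_⟩
      · intro e he
        rw [List.mem_singleton] at he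
        subst he
        exact ⟨rfl, h00g⟩
      · intro q
        simp
      · intro q hq _
        refine ⟨_, List.mem_singleton_self _, ?_⟩
        have := (mem_pvGrid n q).mp hq
        exact ⟨this.1, this.2.2.1⟩
    have hadd0 : PySem.Set.add PySem.Set.empty ((0 : Int), (0 : Int)) = [((0 : Int), (0 : Int))] := rfl
    have hbound0 : ((k.toNat : Int)) + (([] : List (Int × Int)).length : Int) ≤ n * n := by
      simp only [List.length_nil, Nat.cast_zero, add_zero]
      have : ((k.toNat : Int)) = k := Int.toNat_of_nonneg (by omega)
      omega
    have hrun := pvALoop_spec A' B' n (by omega) hlenA hlenB hdA hdB k.toNat []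
      [(-(PySem.List.pyGetD A' 0 0 + PySem.List.pyGetD B' 0 0), ((0 : Int), (0 : Int)))]
      [((0 : Int), (0 : Int))] [] hInv0 hbound0
    rw [hadd0, hrun]
    -- the B side: a[:n] and b[:n] are the first n elements of the sorted arrays
    have hA2 : PySem.List.slice A' none (some n) = A'.take n.toNat :=
      PySem.List.slice_to A' (by omega)
    have hB2 : PySem.List.slice B' none (some n) = B'.take n.toNat :=
      PySem.List.slice_to B' (by omega)
    rw [hA2, hB2]
    have hlenA2 : (((A'.take n.toNat).length : Nat) : Int) = n := by
      rw [List.length_take]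
      omega
    have hlenB2 : (((B'.take n.toNat).length : Nat) : Int) = n := by
      rw [List.length_take]
      omega
    have hmap := pvGrid_map_f (A'.take n.toNat) (B'.take n.toNat) n hlenA2 hlenB2
    have hcongr : (pvGrid n).map (pvF A' B') =
        (pvGrid n).map (pvF (A'.take n.toNat) (B'.take n.toNat)) := by
      apply List.map_congr_left
      intro q hq
      obtain ⟨hq1, hq2, hq3, hq4⟩ := (mem_pvGrid n q).mp hq
      unfold pvF
      rw [pvGetD_take A' n.toNat q.1 hq1 (by omega) (by omega),
        pvGetD_take B' n.toNat q.2 hq3 (by omega) (by omega)]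
    have hrem : pvRemaining A' B' n [] = (pvGrid n).map (pvF A' B') := by
      unfold pvRemaining
      congr 1
      apply List.filter_eq_self.mpr
      intro q _
      simp
    have hsumlen : k.toNat ≤ (PySem.List.sorted ((A'.take n.toNat).flatMap
        (fun x => (B'.take n.toNat).map (fun y => x + y))) (fun s => s) true).length := by
      rw [PySem.List.length_sorted]
      have hl1 : ((A'.take n.toNat).flatMap (fun x => (B'.take n.toNat).map (fun y => x + y))).length =
          (pvGrid n).length := by
        rw [← hmap, List.length_map]
      rw [hl1]
      have hnt : ((n.toNat : Int)) = n := Int.toNat_of_nonneg (by omega)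
      have hgl : (pvGrid n).length = n.toNat * n.toNat := by
        have := pvGrid_length n
        exact_mod_cast this
      have hknn : k ≤ ((n.toNat * n.toNat : Nat) : Int) := by
        push_cast
        rw [hnt]
        exact hk
      omega
    rw [pvMapM_take _ k hsumlen]
    rw [hrem, hcongr, hmap]
    rfl
  · -- k = 1: A performs exactly one pop, returning [a[0] + b[0]] of the sorted arrays
    obtain ⟨hk1, hn1, hla2, hlb2⟩ := hb3
    have hlenA2' : 2 ≤ (A'.length : Int) := by rw [hA', PySem.List.length_sorted]; exact hla2
    have hlenB2' : 2 ≤ (B'.length : Int) := by rw [hB', PySem.List.length_sorted]; exact hlb2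
    have hkt : k.toNat = 1 := by omega
    rw [hkt]
    obtain ⟨a0, tlA, hA0⟩ := List.exists_cons_of_ne_nil (List.ne_nil_of_length_pos hAlen)
    obtain ⟨b0, tlB, hB0⟩ := List.exists_cons_of_ne_nil (List.ne_nil_of_length_pos hBlen)
    have hga0 : PySem.List.pyGetD A' 0 0 = a0 := by
      rw [hA0, PySem.List.pyGetD_of_nonneg _ 0 (le_refl 0)]; rfl
    have hgb0 : PySem.List.pyGetD B' 0 0 = b0 := by
      rw [hB0, PySem.List.pyGetD_of_nonneg _ 0 (le_refl 0)]; rfl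
    have hmaxA : ∀ x ∈ A', x ≤ a0 := by
      intro x hx
      exact PySem.List.key_head_sorted_rev_ge a (fun x => x) (hA'.symm.trans hA0) x
        ((PySem.List.mem_sorted a (fun x => x) true x).mp hx)
    have hmaxB : ∀ y ∈ B', y ≤ b0 := by
      intro y hy
      exact PySem.List.key_head_sorted_rev_ge b (fun x => x) (hB'.symm.trans hB0) y
        ((PySem.List.mem_sorted b (fun x => x) true y).mp hy)
    -- the A side evaluates to [a0 + b0]
    have hLHS : (pvALoop A' B' n 1
        [(-(PySem.List.pyGetD A' 0 0 + PySem.List.pyGetD B' 0 0), ((0 : Int), (0 : Int)))]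
        (PySem.Set.add PySem.Set.empty ((0 : Int), (0 : Int))) []).getD [] = [a0 + b0] := by
      have hpop : pvHeapPop [(-(a0 + b0), ((0 : Int), (0 : Int)))] =
          some ((-(a0 + b0), ((0 : Int), (0 : Int))), []) := by
        simp [pvHeapPop]
      rw [hga0, hgb0]
      simp only [pvALoop, hpop]
      by_cases hn2 : (0 : Int) + 1 < n
      · have hga1 : PySem.List.pyGet? A' ((0 : Int) + 1) = some (PySem.List.pyGetD A' ((0 : Int) + 1) 0) :=
          pvGet_eq A' _ (by omega) (by omega)
        have hgb1 : PySem.List.pyGet? B' ((0 : Int) + 1) = some (PySem.List.pyGetD B' ((0 : Int) + 1) 0) :=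
          pvGet_eq B' _ (by omega) (by omega)
        have hga0' : PySem.List.pyGet? A' (0 : Int) = some (PySem.List.pyGetD A' (0 : Int) 0) :=
          pvGet_eq A' _ (by omega) (by omega)
        have hgb0' : PySem.List.pyGet? B' (0 : Int) = some (PySem.List.pyGetD B' (0 : Int) 0) :=
          pvGet_eq B' _ (by omega) (by omega)
        rw [if_pos (by exact ⟨hn2, by decide⟩ :
          (0 : Int) + 1 < n ∧ ((0 + 1, 0) : Int × Int) ∉ PySem.Set.add PySem.Set.empty ((0 : Int), (0 : Int)))]
        rw [hga1, hgb0']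
        simp only []
        rw [if_pos (by exact ⟨hn2, by decide⟩ :
          (0 : Int) + 1 < n ∧ ((0, 0 + 1) : Int × Int) ∉ PySem.Set.add (PySem.Set.add PySem.Set.empty ((0 : Int), (0 : Int))) (0 + 1, 0))]
        rw [hga0', hgb1]
        simp [pvALoop]
      · rw [if_neg (by intro h; exact hn2 h.1)]
        simp only []
        rw [if_neg (by intro h; exact hn2 h.1)]
        simp [pvALoop]
    rw [hLHS]
    -- the B side: the head of the descending sort of the pairwise sums is a0 + b0
    have hA2 : PySem.List.slice A' none (some n) = A'.take n.toNat :=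
      PySem.List.slice_to A' (by omega)
    have hB2 : PySem.List.slice B' none (some n) = B'.take n.toNat :=
      PySem.List.slice_to B' (by omega)
    rw [hA2, hB2]
    set sums2 := (A'.take n.toNat).flatMap (fun x => (B'.take n.toNat).map (fun y => x + y)) with hsums2
    have hmem0 : a0 + b0 ∈ sums2 := by
      rw [hsums2]
      apply List.mem_flatMap.mpr
      obtain ⟨m, hm⟩ : ∃ m, n.toNat = m + 1 := ⟨n.toNat - 1, by omega⟩
      refine ⟨a0, ?_, List.mem_map.mpr ⟨b0, ?_, rfl⟩⟩
      · rw [hA0, hm, List.take_succ_cons]; exact List.mem_cons_self ..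
      · rw [hB0, hm, List.take_succ_cons]; exact List.mem_cons_self ..
    have hmax : ∀ y ∈ sums2, y ≤ a0 + b0 := by
      intro y hy
      rw [hsums2] at hy
      obtain ⟨x, hx, hy'⟩ := List.mem_flatMap.mp hy
      obtain ⟨z, hz, rfl⟩ := List.mem_map.mp hy'
      have hx' := hmaxA x (List.mem_of_mem_take hx)
      have hz' := hmaxB z (List.mem_of_mem_take hz)
      omega
    have hvs : pvVsort sums2 = (a0 + b0) :: pvVsort (sums2.erase (a0 + b0)) :=
      pvVsort_max_cons sums2 (a0 + b0) hmem0 hmax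
    have hlen1 : 1 ≤ (PySem.List.sorted sums2 (fun s => s) true).length := by
      rw [PySem.List.length_sorted]
      exact List.length_pos_of_mem hmem0
    rw [pvMapM_take _ k (by omega)]
    rw [hkt]
    show [a0 + b0] = (pvVsort sums2).take 1
    rw [hvs]
    rfl
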